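-- pv_equiv track=rewrite | github.com/Polaris-NCR/Soil-fauna-auto-detection-and-measurement | utils.py | remove_endpoints_from_adj
-- ===== SOURCE A (Python) =====
-- def remove_endpoints_from_adj(adj, removed_endpoints):
--     new_adj = {k: v.copy() for k, v in adj.items()}
--
--     for ep in removed_endpoints:
--         if ep in new_adj:
--             for neighbor in new_adj[ep]:
--                 if neighbor in new_adj:
--                     new_adj[neighbor] = [n for n in new_adj[neighbor] if n != ep]
--
--             del new_adj[ep]
--
--     return new_adj
-- ===== SOURCE B (Python) =====
-- def remove_endpoints_from_adj(adj, removed_endpoints):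
--     removed = set(ep for ep in removed_endpoints if ep in adj)
--
--     # index first: which endpoints must be stripped from each node's list
--     to_strip = {}
--     for ep, nbrs in adj.items():
--         if ep in removed:
--             for v in nbrs:
--                 to_strip.setdefault(v, set()).add(ep)
--
--     return {k: [n for n in nbrs if n not in to_strip.get(k, set())]
--             for k, nbrs in adj.items() if k not in removed}
-- ===== Notes on version B (the rewrite author's own statement) =====
-- stated objective: alternative
-- what changed: A mutates a dict copy endpoint by endpoint (deleting each endpoint and re-filtering every neighbour list it touches as it goes); B first builds the set of endpoints actually present and a strip-index mapping each node to the endpoints that must disappear from its list, then produces the result in one pass with a single filter per surviving node.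
import Mathlib
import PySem

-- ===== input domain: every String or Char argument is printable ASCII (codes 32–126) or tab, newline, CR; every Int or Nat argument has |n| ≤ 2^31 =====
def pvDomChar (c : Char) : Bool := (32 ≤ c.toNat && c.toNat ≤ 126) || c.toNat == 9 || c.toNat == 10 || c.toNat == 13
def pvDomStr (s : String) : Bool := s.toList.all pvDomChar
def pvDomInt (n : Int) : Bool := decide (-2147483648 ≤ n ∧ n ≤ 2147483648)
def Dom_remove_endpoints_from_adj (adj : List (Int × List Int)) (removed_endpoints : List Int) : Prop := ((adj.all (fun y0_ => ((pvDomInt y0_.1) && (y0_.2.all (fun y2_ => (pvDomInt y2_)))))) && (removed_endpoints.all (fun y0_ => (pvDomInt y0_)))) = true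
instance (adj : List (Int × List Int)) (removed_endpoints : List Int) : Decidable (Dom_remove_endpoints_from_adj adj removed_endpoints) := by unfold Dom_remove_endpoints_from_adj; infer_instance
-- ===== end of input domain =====

-- B replaces A's stateful per-endpoint dict mutation by an index-first pass (a strip-index built once,
-- then one filter per surviving node); objective: alternative decomposition, same asymptotic cost.

-- ===== PORT A =====
-- inner loop body: 'if neighbor in new_adj: new_adj[neighbor] = [n for n in new_adj[neighbor] if n != ep]'
def pvAinner (ep : Int) (d : PySem.Dict Int (List Int)) (neighbor : Int) : PySem.Dict Int (List Int) :=
  if d.contains neighbor then d.insert neighbor ((d.getD neighbor []).filter (fun n => n != ep)) else d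

-- outer loop body: 'if ep in new_adj: for neighbor in new_adj[ep]: … ; del new_adj[ep]'
def pvAstep (d : PySem.Dict Int (List Int)) (ep : Int) : PySem.Dict Int (List Int) :=
  if d.contains ep then ((d.getD ep []).foldl (pvAinner ep) d).erase ep else d

def remove_endpoints_from_adj (adj : List (Int × List Int)) (removed_endpoints : List Int) : List (Int × List Int) :=
  -- new_adj = {k: v.copy() for k, v in adj.items()}
  let new_adj : PySem.Dict Int (List Int) := adj.foldl (fun d p => d.insert p.1 p.2) PySem.Dict.empty
  (removed_endpoints.foldl pvAstep new_adj).items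

-- ===== PORT B =====
-- loop body of 'for v in nbrs: to_strip.setdefault(v, set()).add(ep)'
def pvBstrip (ep : Int) (d : PySem.Dict Int (PySem.Set Int)) (v : Int) : PySem.Dict Int (PySem.Set Int) :=
  d.modify v PySem.Set.empty (fun s => PySem.Set.add s ep)

def remove_endpoints_from_adj_alt (adj : List (Int × List Int)) (removed_endpoints : List Int) : List (Int × List Int) :=
  let removed : PySem.Set Int :=
    PySem.Set.ofList (removed_endpoints.filter (fun ep => (PySem.Dict.mk adj).contains ep))
  let to_strip : PySem.Dict Int (PySem.Set Int) :=
    adj.foldl (fun d p => if removed.contains p.1 then p.2.foldl (pvBstrip p.1) d else d) PySem.Dict.empty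
  (adj.foldl (fun out p =>
      if removed.contains p.1 then out
      else out.insert p.1 (p.2.filter (fun n => !(to_strip.getD p.1 PySem.Set.empty).contains n)))
    PySem.Dict.empty).items

-- ===== PRECONDITION & SPEC =====
-- Pre_ excludes association lists with duplicate keys: they represent no Python dict (A's argument is a
-- dict, which cannot have duplicates), so first-match lookup behaviour there is accidental.
def Pre_remove_endpoints_from_adj (adj : List (Int × List Int)) (removed_endpoints : List Int) : Prop :=
  (adj.map Prod.fst).Nodup
instance (adj : List (Int × List Int)) (removed_endpoints : List Int) : Decidable (Pre_remove_endpoints_from_adj adj removed_endpoints) := by unfold Pre_remove_endpoints_from_adj; infer_instance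

def pvWitness_remove_endpoints_from_adj : (List (Int × List Int)) × List Int :=
  ([(1, [2, 3]), (2, [1]), (3, [1, 1])], [2, 5])

def Spec_remove_endpoints_from_adj (adj : List (Int × List Int)) (removed_endpoints : List Int) (out : List (Int × List Int)) : Prop := out = remove_endpoints_from_adj_alt adj removed_endpoints
instance (adj : List (Int × List Int)) (removed_endpoints : List Int) (out : List (Int × List Int)) : Decidable (Spec_remove_endpoints_from_adj adj removed_endpoints out) := by unfold Spec_remove_endpoints_from_adj; infer_instance

-- ===== CLAIM (what is proved, stated in full; the proofs are below) =====
def Claim_equal_remove_endpoints_from_adj : Prop := ∀ (adj : List (Int × List Int)) (removed_endpoints : List Int), Dom_remove_endpoints_from_adj adj removed_endpoints → Pre_remove_endpoints_from_adj adj removed_endpoints → Spec_remove_endpoints_from_adj adj removed_endpoints (remove_endpoints_from_adj adj removed_endpoints)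

-- ===== LEMMAS AND PROOFS =====

def pvKeyIn (adj : List (Int × List Int)) (x : Int) : Bool := adj.any (fun p => p.1 == x)
def pvLook (adj : List (Int × List Int)) (x : Int) : List Int := (PySem.Dict.mk adj).getD x []
def pvInR (adj : List (Int × List Int)) (P : List Int) (x : Int) : Bool := decide (x ∈ P) && pvKeyIn adj x
def pvStrip (adj : List (Int × List Int)) (P : List Int) (k n : Int) : Bool :=
  pvInR adj P n && (pvLook adj n).contains k
def pvCanon (adj : List (Int × List Int)) (P : List Int) : List (Int × List Int) :=
  (adj.filter (fun p => !pvInR adj P p.1)).map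
    (fun p => (p.1, p.2.filter (fun n => !pvStrip adj P p.1 n)))

lemma pvCanon_nil (adj : List (Int × List Int)) : pvCanon adj [] = adj := by
  simp [pvCanon, pvInR, pvStrip]

lemma pv_map_fst_filter (l : List (Int × List Int)) (q : Int → Bool) :
    (l.filter (fun p => q p.1)).map Prod.fst = (l.map Prod.fst).filter q := by
  induction l with
  | nil => rfl
  | cons p t ih => by_cases h : q p.1 <;> simp [h, ih]

lemma pvCanon_keys (adj : List (Int × List Int)) (P : List Int) :
    (pvCanon adj P).map Prod.fst = (adj.map Prod.fst).filter (fun x => !pvInR adj P x) := by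
  rw [pvCanon, List.map_map, ← pv_map_fst_filter]
  rfl

lemma pvCanon_keys_nodup (adj : List (Int × List Int)) (P : List Int)
    (hnd : (adj.map Prod.fst).Nodup) : ((pvCanon adj P).map Prod.fst).Nodup := by
  rw [pvCanon_keys]; exact hnd.filter _

lemma pv_keyIn_eq (adj : List (Int × List Int)) (x : Int) :
    pvKeyIn adj x = decide (x ∈ adj.map Prod.fst) := by
  induction adj with
  | nil => rfl
  | cons p t ih =>
    simp [pvKeyIn] at ih ⊢
    by_cases h : p.1 = x
    · simp [h, List.mem_cons]
    · have h' : ¬ x = p.1 := fun e => h e.symm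
      simp [List.mem_cons, h', ih, beq_eq_false_iff_ne.mpr h]

lemma pvA_base (adj : List (Int × List Int)) (hnd : (adj.map Prod.fst).Nodup) :
    adj.foldl (fun d p => d.insert p.1 p.2) PySem.Dict.empty = PySem.Dict.mk adj := by
  apply PySem.Dict.ext
  have h := PySem.Dict.items_foldl_insert_fresh (l := adj) (k := Prod.fst) (v := Prod.snd)
    (d := PySem.Dict.empty) (by intro a _; simp [PySem.Dict.contains_empty]) hnd
  rw [h]
  simp [PySem.Dict.empty, Prod.mk.eta]

lemma pv_contains_canon (adj : List (Int × List Int)) (P : List Int) (ep : Int) :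
    (PySem.Dict.mk (pvCanon adj P)).contains ep = (pvKeyIn adj ep && !decide (ep ∈ P)) := by
  rw [PySem.Dict.contains_eq_decide_mem_keys]
  have hk : ({ items := pvCanon adj P } : PySem.Dict Int (List Int)).keys
      = (adj.map Prod.fst).filter (fun x => !pvInR adj P x) := by
    simpa [PySem.Dict.keys] using pvCanon_keys adj P
  simp only [hk, List.mem_filter, pvInR, pv_keyIn_eq]
  by_cases h1 : ep ∈ adj.map Prod.fst <;> by_cases h2 : ep ∈ P <;> simp [h1, h2]


lemma pv_look_eq (adj : List (Int × List Int)) (q : Int × List Int)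
    (hnd : (adj.map Prod.fst).Nodup) (hq : q ∈ adj) : pvLook adj q.1 = q.2 := by
  rw [pvLook]
  exact PySem.Dict.getD_of_mem_items (d := PySem.Dict.mk adj) (k := q.1) (v := q.2)
    (by rw [Prod.mk.eta]; exact hq) (by simpa [PySem.Dict.keys] using hnd) []

lemma pv_getD_canon (adj : List (Int × List Int)) (P : List Int) (ep : Int)
    (hnd : (adj.map Prod.fst).Nodup) (h1 : pvKeyIn adj ep = true) (h2 : ep ∉ P) :
    (PySem.Dict.mk (pvCanon adj P)).getD ep [] =
      (pvLook adj ep).filter (fun n => !pvStrip adj P ep n) := by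
  rw [pv_keyIn_eq, decide_eq_true_iff, List.mem_map] at h1
  obtain ⟨q, hq, hq1⟩ := h1
  have hlook : pvLook adj ep = q.2 := by rw [← hq1]; exact pv_look_eq adj q hnd hq
  have hmem : (ep, (pvLook adj ep).filter (fun n => !pvStrip adj P ep n)) ∈ pvCanon adj P := by
    rw [pvCanon]
    refine List.mem_map.mpr ⟨q, List.mem_filter.mpr ⟨hq, ?_⟩, ?_⟩
    · simp [pvInR, hq1, h2]
    · rw [hlook, hq1]
  exact PySem.Dict.getD_of_mem_items (d := PySem.Dict.mk (pvCanon adj P)) hmem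
    (by simpa [PySem.Dict.keys] using pvCanon_keys_nodup adj P hnd) []
lemma pv_inner_fold (ep : Int) (lst : List Int) :
    ∀ d : PySem.Dict Int (List Int), d.keys.Nodup →
      lst.foldl (pvAinner ep) d =
        PySem.Dict.mk (d.items.map
          (fun p => if lst.contains p.1 then (p.1, p.2.filter (fun n => n != ep)) else p)) := by
  induction lst with
  | nil =>
    intro d _
    apply PySem.Dict.ext
    simp
  | cons v rest ih =>
    intro d hnd
    rw [List.foldl_cons]
    by_cases hv : d.contains v = true
    · have hstep : pvAinner ep d v
          = d.insert v ((d.getD v []).filter (fun n => n != ep)) := by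
        rw [pvAinner, if_pos hv]
      have hnd' : (d.insert v ((d.getD v []).filter (fun n => n != ep))).keys.Nodup := by
        rw [PySem.Dict.keys_insert_of_contains _ _ hv]; exact hnd
      rw [hstep, ih _ hnd']
      apply PySem.Dict.ext
      rw [PySem.Dict.items_insert_of_contains _ _ hv]
      simp only [List.map_map]
      apply List.map_congr_left
      intro p hp
      by_cases hpv : p.1 = v
      · have hget : d.getD v [] = p.2 := by
          rw [← hpv]
          exact PySem.Dict.getD_of_mem_items (d := d) (by rw [Prod.mk.eta]; exact hp) hnd []
        have hfilt : (p.2.filter (fun n => n != ep)).filter (fun n => n != ep)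
            = p.2.filter (fun n => n != ep) := by
          rw [List.filter_filter]
          exact List.filter_congr (fun a _ => Bool.and_self _)
        by_cases hr : v ∈ rest <;>
          simp [hpv, hget, hfilt, hr]
      · by_cases hr : p.1 ∈ rest <;>
          simp [hpv, hr]
    · have hstep : pvAinner ep d v = d := by rw [pvAinner, if_neg hv]
      rw [hstep, ih _ hnd]
      apply PySem.Dict.ext
      apply List.map_congr_left
      intro p hp
      have hpv : ¬ p.1 = v := by
        intro e
        apply hv
        rw [PySem.Dict.contains]
        exact List.any_eq_true.mpr ⟨p, hp, by simp [e]⟩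
      by_cases hr : p.1 ∈ rest <;> simp [hpv, hr]

lemma pvInR_append (adj : List (Int × List Int)) (P : List Int) (ep x : Int) :
    pvInR adj (P ++ [ep]) x = (pvInR adj P x || (decide (x = ep) && pvKeyIn adj ep)) := by
  by_cases h : x = ep <;> by_cases h2 : x ∈ P <;>
    simp [pvInR, List.mem_append, h, h2]

lemma pvStrip_append (adj : List (Int × List Int)) (P : List Int) (ep k n : Int) :
    pvStrip adj (P ++ [ep]) k n
      = (pvStrip adj P k n || (decide (n = ep) && pvKeyIn adj ep && (pvLook adj ep).contains k)) := by
  by_cases h : n = ep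
  · simp [pvStrip, pvInR_append, h, Bool.and_or_distrib_right]
  · simp [pvStrip, pvInR_append, h]

lemma pvCanon_congr (adj : List (Int × List Int)) (P Q : List Int)
    (h : ∀ x, pvInR adj P x = pvInR adj Q x) : pvCanon adj P = pvCanon adj Q := by
  simp only [pvCanon, pvStrip, h]

lemma pv_filter_map_fst (l : List (Int × List Int)) (f : Int × List Int → Int × List Int)
    (hf : ∀ p, (f p).1 = p.1) (q : Int → Bool) :
    (l.map f).filter (fun p => q p.1) = (l.filter (fun p => q p.1)).map f := by
  induction l with
  | nil => rfl
  | cons p t ih => by_cases h : q p.1 = true <;> simp [hf, h, ih]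

lemma pvAstep_canon (adj : List (Int × List Int)) (P : List Int) (ep : Int)
    (hnd : (adj.map Prod.fst).Nodup) :
    pvAstep (PySem.Dict.mk (pvCanon adj P)) ep = PySem.Dict.mk (pvCanon adj (P ++ [ep])) := by
  by_cases hkey : pvKeyIn adj ep = true
  case neg =>
    have hkf : pvKeyIn adj ep = false := by simpa using hkey
    have hc : (PySem.Dict.mk (pvCanon adj P)).contains ep = false := by
      rw [pv_contains_canon]; simp [hkf]
    rw [pvAstep, hc]
    simp only [Bool.false_eq_true, if_false]
    have : pvCanon adj P = pvCanon adj (P ++ [ep]) := by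
      apply pvCanon_congr
      intro x
      rw [pvInR_append]
      simp [hkf]
    rw [this]
  case pos =>
    by_cases hp : ep ∈ P
    · -- already processed: nothing changes
      have hc : (PySem.Dict.mk (pvCanon adj P)).contains ep = false := by
        rw [pv_contains_canon]; simp [hp]
      rw [pvAstep, hc]
      simp only [Bool.false_eq_true, if_false]
      have : pvCanon adj P = pvCanon adj (P ++ [ep]) := by
        apply pvCanon_congr
        intro x
        rw [pvInR_append]
        by_cases hx : x = ep
        · simp [hx, pvInR, hp, hkey]
        · simp [hx]
      rw [this]
    · -- the interesting case
      have hc : (PySem.Dict.mk (pvCanon adj P)).contains ep = true := by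
        rw [pv_contains_canon]; simp [hkey, hp]
      have hndk : (PySem.Dict.mk (pvCanon adj P)).keys.Nodup := by
        simpa [PySem.Dict.keys] using pvCanon_keys_nodup adj P hnd
      rw [pvAstep, hc]
      simp only [if_true]
      rw [pv_getD_canon adj P ep hnd hkey hp]
      rw [pv_inner_fold ep _ _ hndk]
      rw [PySem.Dict.erase]
      apply PySem.Dict.ext
      conv_lhs => rw [pvCanon]
      rw [List.map_map]
      rw [pv_filter_map_fst _ _
        (by intro p; simp only [Function.comp_apply]; split <;> rfl)
        (q := fun x => !(x == ep))]
      rw [List.filter_filter]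
      conv_rhs => rw [pvCanon]
      have hfe : adj.filter (fun p => !(p.1 == ep) && !pvInR adj P p.1)
          = adj.filter (fun p => !pvInR adj (P ++ [ep]) p.1) := by
        apply List.filter_congr
        intro p _
        rw [pvInR_append]
        by_cases h1 : p.1 = ep <;> simp [h1, hkey]
      rw [← hfe]
      apply List.map_congr_left
      intro p hpmem
      rw [List.mem_filter] at hpmem
      obtain ⟨hpa, hcond⟩ := hpmem
      have hpe : ¬ p.1 = ep := by
        intro e; simp [e] at hcond
      have hpr : pvInR adj P p.1 = false := by
        rcases Bool.and_eq_true_iff.mp hcond with ⟨_, h2⟩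
        simpa using h2
      have hstripP : pvStrip adj P ep p.1 = false := by
        simp [pvStrip, hpr]
      simp only [Function.comp_apply]
      by_cases hL : p.1 ∈ pvLook adj ep
      · have hcont : ((pvLook adj ep).filter (fun n => !pvStrip adj P ep n)).contains p.1 = true := by
          simp [List.mem_filter, hL, hstripP]
        rw [if_pos hcont, List.filter_filter]
        congr 1
        apply List.filter_congr
        intro n _
        rw [pvStrip_append]
        by_cases hn : n = ep <;> simp [hn, hkey, hL]
      · have hcont : ((pvLook adj ep).filter (fun n => !pvStrip adj P ep n)).contains p.1 = false := by
          simp only [List.contains_eq_mem, List.mem_filter, decide_eq_false_iff_not]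
          intro h
          first
          | exact absurd h hL
          | exact absurd h.1 hL
        rw [if_neg (by rw [hcont]; simp)]
        congr 1
        apply List.filter_congr
        intro n _
        rw [pvStrip_append]
        by_cases hn : n = ep <;> simp [hn, hkey, hL]

lemma pvA_loop (adj : List (Int × List Int)) (hnd : (adj.map Prod.fst).Nodup) :
    ∀ (Q P : List Int),
      Q.foldl pvAstep (PySem.Dict.mk (pvCanon adj P)) = PySem.Dict.mk (pvCanon adj (P ++ Q)) := by
  intro Q
  induction Q with
  | nil => intro P; simp
  | cons q Q ih =>
    intro P
    rw [List.foldl_cons, pvAstep_canon adj P q hnd, ih (P ++ [q])]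
    simp

lemma pvA_eq_canon (adj : List (Int × List Int)) (rem : List Int)
    (hnd : (adj.map Prod.fst).Nodup) :
    remove_endpoints_from_adj adj rem = pvCanon adj rem := by
  rw [remove_endpoints_from_adj]
  rw [pvA_base adj hnd]
  have h0 : (PySem.Dict.mk adj : PySem.Dict Int (List Int)) = PySem.Dict.mk (pvCanon adj []) := by
    rw [pvCanon_nil]
  rw [h0, pvA_loop adj hnd rem []]
  simp

-- ===== B side =====
lemma pv_set_add_contains (s : PySem.Set Int) (x n : Int) :
    (PySem.Set.add s x).contains n = (s.contains n || x == n) := by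
  rw [PySem.Set.add]
  by_cases hx : s.contains x = true
  · rw [if_pos hx]
    by_cases hxn : x = n
    · subst hxn
      have hxm : x ∈ s := by simpa [PySem.Set.contains, List.contains_eq_mem] using hx
      simp [PySem.Set.contains, hxm]
    · simp [beq_eq_false_iff_ne.mpr hxn]
  · rw [if_neg hx]
    by_cases hxn : x = n
    · subst hxn
      simp [PySem.Set.contains, List.mem_append]
    · have hxn' : ¬ n = x := fun e => hxn e.symm
      simp [PySem.Set.contains, List.mem_append, hxn', beq_eq_false_iff_ne.mpr hxn]

lemma pv_removed_contains (adj : List (Int × List Int)) (rem : List Int) (x : Int) :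
    (PySem.Set.ofList (rem.filter (fun ep => (PySem.Dict.mk adj).contains ep))).contains x
      = pvInR adj rem x := by
  rw [Bool.eq_iff_iff]
  simp [PySem.Set.contains, PySem.Set.mem_ofList, List.mem_filter, pvInR, pvKeyIn,
    PySem.Dict.contains]

lemma pvBstrip_inner (ep : Int) (nbrs : List Int) :
    ∀ (d : PySem.Dict Int (PySem.Set Int)) (k n : Int),
      ((nbrs.foldl (pvBstrip ep) d).getD k PySem.Set.empty).contains n
        = ((d.getD k PySem.Set.empty).contains n || (nbrs.contains k && ep == n)) := by
  induction nbrs with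
  | nil => intro d k n; simp
  | cons v rest ih =>
    intro d k n
    rw [List.foldl_cons]
    show ((rest.foldl (pvBstrip ep) (pvBstrip ep d v)).getD k PySem.Set.empty).contains n = _
    rw [ih]
    rw [pvBstrip, PySem.Dict.getD_modify]
    by_cases hkv : k = v
    · rw [if_pos hkv, pv_set_add_contains]
      by_cases hen : ep = n
      · subst hen
        simp [hkv]
      · simp [hkv, beq_eq_false_iff_ne.mpr hen]
    · rw [if_neg hkv]
      have : ¬ k = v := hkv
      by_cases hr : k ∈ rest <;> simp [this, hr]

lemma pv_tostrip (c : Int → Bool) :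
    ∀ (l : List (Int × List Int)) (d : PySem.Dict Int (PySem.Set Int)) (k n : Int),
      ((l.foldl (fun d p => if c p.1 then p.2.foldl (pvBstrip p.1) d else d) d).getD k PySem.Set.empty).contains n
        = ((d.getD k PySem.Set.empty).contains n
            || l.any (fun p => c p.1 && p.1 == n && p.2.contains k)) := by
  intro l
  induction l with
  | nil => intro d k n; simp
  | cons p t ih =>
    intro d k n
    rw [List.foldl_cons]
    by_cases hc : c p.1 = true
    · rw [if_pos hc, ih, pvBstrip_inner]
      simp only [List.any_cons, hc, Bool.true_and, Bool.or_assoc]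
      rw [Bool.and_comm]
    · rw [if_neg hc, ih]
      have hcf : c p.1 = false := by simpa using hc
      simp [hcf]

lemma pv_any_key (adj : List (Int × List Int)) (n : Int) (g : List Int → Bool)
    (hnd : (adj.map Prod.fst).Nodup) :
    adj.any (fun p => p.1 == n && g p.2) = (pvKeyIn adj n && g (pvLook adj n)) := by
  cases hk : pvKeyIn adj n
  · simp only [Bool.false_and]
    rw [pv_keyIn_eq] at hk
    simp only [decide_eq_false_iff_not] at hk
    apply List.any_eq_false.mpr
    intro p hp
    have : ¬ p.1 = n := fun e => hk (List.mem_map.mpr ⟨p, hp, e⟩)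
    simp [this]
  · simp only [Bool.true_and]
    cases hg : g (pvLook adj n)
    · apply List.any_eq_false.mpr
      intro p hp
      by_cases hpn : p.1 = n
      · have : pvLook adj n = p.2 := by rw [← hpn]; exact pv_look_eq adj p hnd hp
        rw [this] at hg
        simp [hg]
      · simp [hpn]
    · rw [pv_keyIn_eq] at hk
      simp only [decide_eq_true_iff] at hk
      obtain ⟨p, hp, hpn⟩ := List.mem_map.mp hk
      apply List.any_eq_true.mpr
      refine ⟨p, hp, ?_⟩
      have : pvLook adj n = p.2 := by rw [← hpn]; exact pv_look_eq adj p hnd hp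
      simp [hpn, ← this, hg]

lemma pv_out_fold (c : Int → Bool) (f : Int × List Int → List Int) :
    ∀ (l : List (Int × List Int)) (out : PySem.Dict Int (List Int)),
      (∀ x ∈ l.map Prod.fst, out.contains x = false) → (l.map Prod.fst).Nodup →
      (l.foldl (fun out p => if c p.1 then out else out.insert p.1 (f p)) out).items
        = out.items ++ (l.filter (fun p => !c p.1)).map (fun p => (p.1, f p)) := by
  intro l
  induction l with
  | nil => intro out _ _; simp
  | cons p t ih =>
    intro out hdis hnd
    rw [List.foldl_cons]
    by_cases hc : c p.1 = true
    · rw [if_pos hc, ih out (fun x hx => hdis x (by simp [hx])) (by simpa using hnd.of_cons)]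
      simp [hc]
    · have hcf : c p.1 = false := by simpa using hc
      rw [if_neg hc]
      have hout : out.contains p.1 = false := hdis p.1 (by simp)
      have hstep : (out.insert p.1 (f p)).items = out.items ++ [(p.1, f p)] :=
        PySem.Dict.items_insert_of_not_contains _ _ hout
      have hdis' : ∀ x ∈ t.map Prod.fst, (out.insert p.1 (f p)).contains x = false := by
        intro x hx
        rw [PySem.Dict.contains_insert]
        have h1 : out.contains x = false := hdis x (by simp [hx])
        have h2 : ¬ x = p.1 := by
          intro e
          have hnd' := hnd
          rw [List.map_cons, List.nodup_cons] at hnd'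
          exact hnd'.1 (e ▸ hx)
        simp [h1, beq_eq_false_iff_ne.mpr h2]
      rw [ih _ hdis' (by simpa using hnd.of_cons), hstep]
      simp [hcf]


lemma pvB_eq_canon (adj : List (Int × List Int)) (rem : List Int)
    (hnd : (adj.map Prod.fst).Nodup) :
    remove_endpoints_from_adj_alt adj rem = pvCanon adj rem := by
  simp only [remove_endpoints_from_adj_alt]
  rw [pv_out_fold
      (fun x => (PySem.Set.ofList (rem.filter (fun ep => (PySem.Dict.mk adj).contains ep))).contains x)
      (fun p => p.2.filter (fun n =>
        !((adj.foldl (fun d p => if (PySem.Set.ofList (rem.filter (fun ep => (PySem.Dict.mk adj).contains ep))).contains p.1 then p.2.foldl (pvBstrip p.1) d else d) PySem.Dict.empty).getD p.1 PySem.Set.empty).contains n))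
      adj PySem.Dict.empty
      (fun x _ => PySem.Dict.contains_empty x) hnd]
  have hfil : adj.filter (fun p =>
        !(PySem.Set.ofList (rem.filter (fun ep => (PySem.Dict.mk adj).contains ep))).contains p.1)
      = adj.filter (fun p => !pvInR adj rem p.1) :=
    List.filter_congr (fun p _ => by rw [pv_removed_contains])
  rw [hfil, pvCanon]
  rw [show (PySem.Dict.empty : PySem.Dict Int (List Int)).items = [] from rfl, List.nil_append]
  apply List.map_congr_left
  intro p hpmem
  have hval : ∀ n, ((adj.foldl (fun d p => if (PySem.Set.ofList (rem.filter (fun ep => (PySem.Dict.mk adj).contains ep))).contains p.1 then p.2.foldl (pvBstrip p.1) d else d) PySem.Dict.empty).getD p.1 PySem.Set.empty).contains n = pvStrip adj rem p.1 n := by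
    intro n
    rw [pv_tostrip]
    rw [show (PySem.Dict.empty : PySem.Dict Int (PySem.Set Int)).getD p.1 PySem.Set.empty
          = PySem.Set.empty from rfl]
    rw [show (PySem.Set.empty : PySem.Set Int).contains n = false from rfl, Bool.false_or]
    have hany : (fun q : Int × List Int =>
          (PySem.Set.ofList (rem.filter (fun ep => (PySem.Dict.mk adj).contains ep))).contains q.1
            && q.1 == n && q.2.contains p.1)
        = (fun q : Int × List Int => q.1 == n && (pvInR adj rem n && q.2.contains p.1)) := by
      funext q
      rw [pv_removed_contains]
      by_cases hq : q.1 = n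
      · rw [hq]
        cases pvInR adj rem n <;> simp
      · simp [beq_eq_false_iff_ne.mpr hq]
    rw [hany, pv_any_key adj n (fun v => pvInR adj rem n && v.contains p.1) hnd, pvStrip, pvInR]
    cases hd : decide (n ∈ rem) <;> cases hk : pvKeyIn adj n <;> simp
  simp only [hval]

-- ===== VERDICT (by name: the statement is the Claim_ definition above) =====
theorem remove_endpoints_from_adj_spec : Claim_equal_remove_endpoints_from_adj := by
  intro adj removed_endpoints _ hpre
  unfold Spec_remove_endpoints_from_adj
  rw [pvA_eq_canon adj removed_endpoints hpre, pvB_eq_canon adj removed_endpoints hpre]
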